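-- pv_equiv track=rewrite | github.com/ManojKumarPatnaik/practice-alg | Solution/DivideIntoGroups.py | solution
-- ===== SOURCE A (Python) =====
-- def solution(A):
--   """
--   Finds the minimum possible maximum difference between the largest and smallest integer in each of three non-empty groups of the given array.
--
--   Args:
--     A: A list of integers.
--
--   Returns:
--     The minimum possible maximum difference.
--   """
--
--   # Sort the array in ascending order.
--   A.sort()
--
--   # Initialize the minimum and maximum possible maximum differences.
--   minDiff = 0
--   maxDiff = A[-1] - A[0]
--
--   # Iterate over the middle of the range of possible maximum differences.
--   while minDiff < maxDiff:
--     # Calculate the middle possible maximum difference.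
--     midDiff = (minDiff + maxDiff) // 2
--
--     # Initialize the number of groups and the minimum and maximum values in the current group.
--     number_groups = 1
--     minGroup = maxGroup = A[0]
--
--     # Iterate over the array and try to form three non-empty groups with the current middle possible maximum difference.
--     for i in range(1, len(A)):
--       # Update the minimum and maximum values in the current group.
--       minGroup = min(minGroup, A[i])
--       maxGroup = max(maxGroup, A[i])
--
--       # If the maximum difference in the current group is greater than the middle possible maximum difference,
--       # then we need to form a new group.
--       if maxGroup - minGroup > midDiff:
--         number_groups += 1
--         minGroup = maxGroup = A[i]
--
--     # If we need to form more than three groups with the current middle possible maximum difference,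
--     # then the minimum possible maximum difference is greater than the middle possible maximum difference.
--     if number_groups > 3:
--       minDiff = midDiff + 1
--     # Otherwise, the maximum possible maximum difference is less than or equal to the middle possible maximum difference.
--     else:
--       maxDiff = midDiff
--
--   # Return the minimum possible maximum difference.
--   return maxDiff
-- ===== SOURCE B (Python) =====
-- def solution(A):
--   """Brute force over the two cut points of the sorted array (sorts A in place, like the original)."""
--   A.sort()
--   n = len(A)
--   if n < 3:
--     return 0
--   return min(
--     max(A[i - 1] - A[0], A[j - 1] - A[i], A[n - 1] - A[j])
--     for i in range(1, n - 1)
--     for j in range(i + 1, n)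
--   )
-- ===== Notes on version B (the rewrite author's own statement) =====
-- stated objective: alternative
-- what changed: Replaces binary search on the answer with a greedy feasibility check by a direct brute-force minimum over the two cut positions of the sorted array (min over all 3-way contiguous splits of the max group range).
import Mathlib
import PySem

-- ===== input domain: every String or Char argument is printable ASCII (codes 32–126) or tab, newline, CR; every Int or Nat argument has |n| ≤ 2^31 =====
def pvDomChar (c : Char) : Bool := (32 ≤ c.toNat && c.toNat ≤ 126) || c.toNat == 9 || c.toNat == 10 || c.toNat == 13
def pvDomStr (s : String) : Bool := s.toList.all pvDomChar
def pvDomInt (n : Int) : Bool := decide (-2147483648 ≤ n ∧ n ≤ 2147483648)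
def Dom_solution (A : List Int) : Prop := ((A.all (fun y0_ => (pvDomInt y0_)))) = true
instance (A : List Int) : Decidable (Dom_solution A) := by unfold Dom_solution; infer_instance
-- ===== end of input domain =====

-- B replaces A's binary search on the answer (with its greedy grouping check) by a direct
-- brute-force minimum over the two cut positions of the sorted array (objective: alternative
-- algorithm, same exact value). Both programs sort the argument list in place; the
-- equivalence proved here is about the RETURN value (the in-place mutation is identical).

-- ===== PORT A =====
-- one step of A's inner for-loop: state = (number_groups, minGroup, maxGroup)
def greedyStep (midDiff : Int) (st : Int × Int × Int) (x : Int) : Int × Int × Int :=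
  let mn := min st.2.1 x
  let mx := max st.2.2 x
  if mx - mn > midDiff then (st.1 + 1, x, x) else (st.1, mn, mx)

-- A's inner loop: the number of groups formed on the sorted list for threshold midDiff
-- (the [] case is unreachable under Pre_solution: the Python raises before reaching the loop)
def numberGroups (As : List Int) (midDiff : Int) : Int :=
  match As with
  | [] => 1
  | a :: t => (t.foldl (greedyStep midDiff) (1, a, a)).1

-- A's while-loop (binary search on the answer)
def bsLoop (As : List Int) (minDiff maxDiff : Int) : Int :=
  if h : minDiff < maxDiff then
    let midDiff := PySem.Int.floordiv (minDiff + maxDiff) 2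
    if numberGroups As midDiff > 3 then bsLoop As (midDiff + 1) maxDiff
    else bsLoop As minDiff midDiff
  else maxDiff
termination_by (maxDiff - minDiff).toNat
decreasing_by
  · rw [PySem.Int.floordiv_eq_ediv_of_pos (by omega)]; omega
  · rw [PySem.Int.floordiv_eq_ediv_of_pos (by omega)]; omega

def solution (A : List Int) : Int :=
  let As := PySem.List.sorted A (fun x => x) false
  let maxDiff := PySem.List.pyGetD As (-1) 0 - PySem.List.pyGetD As 0 0
  bsLoop As 0 maxDiff

-- ===== PORT B =====
-- max range of the three groups [0,i), [i,j), [j,n) of the sorted list (the generator body)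
def cutVal (As : List Int) (n i j : Int) : Int :=
  max (max (PySem.List.pyGetD As (i - 1) 0 - PySem.List.pyGetD As 0 0)
           (PySem.List.pyGetD As (j - 1) 0 - PySem.List.pyGetD As i 0))
      (PySem.List.pyGetD As (n - 1) 0 - PySem.List.pyGetD As j 0)

def solution_alt (A : List Int) : Int :=
  let As := PySem.List.sorted A (fun x => x) false
  let n : Int := As.length
  if n < 3 then 0
  else
    (PySem.List.min?
      ((PySem.List.pyRange 1 (n - 1) 1).flatMap
        (fun i => (PySem.List.pyRange (i + 1) n 1).map (fun j => cutVal As n i j)))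
      (fun y => y)).getD 0

-- ===== PRECONDITION & SPEC =====
-- Pre_ excludes only the empty list, on which A raises IndexError (A[-1]).
def Pre_solution (A : List Int) : Prop := A ≠ []
instance (A : List Int) : Decidable (Pre_solution A) := by unfold Pre_solution; infer_instance
def pvWitness_solution : List Int := ([3, 1, 4, 1, 5])

def Spec_solution (A : List Int) (out : Int) : Prop := out = solution_alt A
instance (A : List Int) (out : Int) : Decidable (Spec_solution A out) := by unfold Spec_solution; infer_instance

-- ===== CLAIM (what is proved, stated in full; the proofs are below) =====
def Claim_equal_solution : Prop := ∀ (A : List Int), Dom_solution A → Pre_solution A → Spec_solution A (solution A)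

-- ===== LEMMAS AND PROOFS =====

-- range of the contiguous block [u,v) of the sorted list
def gp (S : List Int) (u v : Nat) : Int := S.getD (v - 1) 0 - S.getD u 0

theorem getD_eq_getElem_int (S : List Int) (u : Nat) (hu : u < S.length) :
    S.getD u 0 = S[u] := by
  rw [List.getD_eq_getElem?_getD, List.getElem?_eq_getElem hu]; rfl

theorem pairwise_getD_mono (S : List Int) (hpw : S.Pairwise (· ≤ ·)) (u v : Nat)
    (huv : u ≤ v) (hv : v < S.length) : S.getD u 0 ≤ S.getD v 0 := by
  rw [getD_eq_getElem_int S u (lt_of_le_of_lt huv hv), getD_eq_getElem_int S v hv]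
  rcases Nat.lt_or_ge u v with h | h
  · exact List.pairwise_iff_getElem.mp hpw u v _ hv h
  · have : u = v := le_antisymm huv h
    subst this; rfl

-- elements of the block [u,v) of a sorted list lie in the window [S[u], S[v-1]]
theorem mem_block_bounds (S : List Int) (hpw : S.Pairwise (· ≤ ·)) (u v : Nat)
    (hv : v ≤ S.length) :
    ∀ y ∈ (S.drop u).take (v - u), S.getD u 0 ≤ y ∧ y ≤ S.getD (v - 1) 0 := by
  intro y hy
  obtain ⟨k, hk, hval⟩ := List.getElem_of_mem hy
  have hk1 : k < v - u := lt_of_lt_of_le hk (by simp)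
  have hk2 : u + k < S.length := by omega
  have hyv : y = S[u + k] := by
    rw [← hval, List.getElem_take, List.getElem_drop]
  constructor
  · rw [hyv, ← getD_eq_getElem_int S (u+k) hk2]
    exact pairwise_getD_mono S hpw u (u+k) (by omega) hk2
  · rw [hyv, ← getD_eq_getElem_int S (u+k) hk2]
    exact pairwise_getD_mono S hpw (u+k) (v-1) (by omega) (by omega)

-- the group count grows by at most the number of elements folded
theorem fold_count_le (d : Int) (Y : List Int) :
    ∀ (s : Int × Int × Int), (Y.foldl (greedyStep d) s).1 ≤ s.1 + Y.length := by
  induction Y with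
  | nil => intro s; simp
  | cons y t ih =>
    intro s
    refine le_trans (ih (greedyStep d s y)) ?_
    unfold greedyStep; dsimp only
    split_ifs <;> simp <;> omega

-- no break: folding elements of a window of span ≤ d over a state inside the window
theorem fold_NB (d lo hi : Int) (hspan : hi - lo ≤ d) (Y : List Int) :
    ∀ (c mn mx : Int), (∀ y ∈ Y, lo ≤ y ∧ y ≤ hi) → lo ≤ mn → mn ≤ mx → mx ≤ hi →
      (Y.foldl (greedyStep d) (c, mn, mx)).1 = c ∧
      lo ≤ (Y.foldl (greedyStep d) (c, mn, mx)).2.1 ∧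
      (Y.foldl (greedyStep d) (c, mn, mx)).2.1 ≤ (Y.foldl (greedyStep d) (c, mn, mx)).2.2 ∧
      (Y.foldl (greedyStep d) (c, mn, mx)).2.2 ≤ hi := by
  induction Y with
  | nil => intro c mn mx _ h1 h2 h3; exact ⟨rfl, h1, h2, h3⟩
  | cons y t ih =>
    intro c mn mx hm h1 h2 h3
    obtain ⟨hy1, hy2⟩ := hm y List.mem_cons_self
    have hnb : greedyStep d (c, mn, mx) y = (c, min mn y, max mx y) := by
      unfold greedyStep; dsimp only
      rw [if_neg (by omega)]
    simp only [List.foldl_cons, hnb]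
    exact ih c _ _ (fun z hz => hm z (List.mem_cons_of_mem _ hz))
      (by omega) (by omega) (by omega)

-- at most one break while folding elements drawn from a window of span ≤ d
theorem fold_one (d lo hi : Int) (hlh : lo ≤ hi) (hspan : hi - lo ≤ d) (Y : List Int) :
    ∀ (c mn mx : Int), (∀ y ∈ Y, lo ≤ y ∧ y ≤ hi) → mn ≤ mx →
      ((Y.foldl (greedyStep d) (c, mn, mx)).1 = c ∨
       (Y.foldl (greedyStep d) (c, mn, mx)).1 = c + 1) ∧
      (Y.foldl (greedyStep d) (c, mn, mx)).2.1 ≤ (Y.foldl (greedyStep d) (c, mn, mx)).2.2 := by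
  induction Y with
  | nil => intro c mn mx _ h2; exact ⟨Or.inl rfl, h2⟩
  | cons y t ih =>
    intro c mn mx hm h2
    obtain ⟨hy1, hy2⟩ := hm y List.mem_cons_self
    have hmt : ∀ z ∈ t, lo ≤ z ∧ z ≤ hi := fun z hz => hm z (List.mem_cons_of_mem _ hz)
    simp only [List.foldl_cons]
    by_cases hb : max mx y - min mn y > d
    · have hstep : greedyStep d (c, mn, mx) y = (c + 1, y, y) := by
        unfold greedyStep; dsimp only; rw [if_pos hb]
      rw [hstep]
      obtain ⟨hc, hl, hmm, hh⟩ := fold_NB d lo hi hspan t (c+1) y y hmt hy1 le_rfl hy2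
      exact ⟨Or.inr hc, hmm⟩
    · have hstep : greedyStep d (c, mn, mx) y = (c, min mn y, max mx y) := by
        unfold greedyStep; dsimp only; rw [if_neg hb]
      rw [hstep]
      exact ih c _ _ hmt (by omega)

-- a 3-way cut with all block ranges ≤ d makes the greedy check feasible
theorem cuts_feasible (S : List Int) (hpw : S.Pairwise (· ≤ ·)) (d : Int) (i j : Nat)
    (hi : 1 ≤ i) (hij : i < j) (hj : j < S.length)
    (h1 : gp S 0 i ≤ d) (h2 : gp S i j ≤ d) (h3 : gp S j S.length ≤ d) :
    numberGroups S d ≤ 3 := by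
  obtain ⟨a, t, rfl⟩ : ∃ a t, S = a :: t := by
    cases S with
    | nil => simp at hj
    | cons a t => exact ⟨a, t, rfl⟩
  set S := a :: t with hS
  have hd : 0 ≤ d := by
    refine le_trans ?_ h1
    unfold gp
    have := pairwise_getD_mono S hpw 0 (i - 1) (by omega) (by omega)
    omega
  -- decompose the tail into the three blocks
  have hta : t = S.drop 1 := rfl
  have hdec : t = (S.drop 1).take (i - 1) ++ ((S.drop i).take (j - i) ++ S.drop j) := by
    rw [hta]
    conv_lhs => rw [← List.take_append_drop (i - 1) (S.drop 1)]
    congr 1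
    rw [List.drop_drop]
    have : 1 + (i - 1) = i := by omega
    rw [this]
    conv_lhs => rw [← List.take_append_drop (j - i) (S.drop i)]
    congr 1
    rw [List.drop_drop]
    congr 1
    omega
  have ha0 : a = S.getD 0 0 := rfl
  show (t.foldl (greedyStep d) (1, a, a)).1 ≤ 3
  rw [hdec, List.foldl_append, List.foldl_append]
  -- block 1: no break
  have hb1 := fold_NB d (S.getD 0 0) (S.getD (i - 1) 0) h1 ((S.drop 1).take (i - 1))
    1 a a (by
      intro y hy
      have := mem_block_bounds S hpw 1 i (by omega) y hy
      have h01 := pairwise_getD_mono S hpw 0 1 (by omega) (by omega)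
      omega)
    (by omega) le_rfl (ha0 ▸ pairwise_getD_mono S hpw 0 (i - 1) (by omega) (by omega))
  set r1 := ((S.drop 1).take (i - 1)).foldl (greedyStep d) (1, a, a) with hr1
  obtain ⟨hc1, hl1, hm1, hh1⟩ := hb1
  -- block 2: at most one break
  have hr1eta : r1 = (r1.1, r1.2.1, r1.2.2) := rfl
  have hb2 := fold_one d (S.getD i 0) (S.getD (j - 1) 0)
    (pairwise_getD_mono S hpw i (j - 1) (by omega) (by omega)) h2
    ((S.drop i).take (j - i)) r1.1 r1.2.1 r1.2.2
    (fun y hy => mem_block_bounds S hpw i j (by omega) y hy) hm1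
  rw [← hr1eta] at hb2
  set r2 := ((S.drop i).take (j - i)).foldl (greedyStep d) r1 with hr2
  obtain ⟨hc2, hm2⟩ := hb2
  -- block 3: at most one break
  have hr2eta : r2 = (r2.1, r2.2.1, r2.2.2) := rfl
  have hdj : S.drop j = (S.drop j).take (S.length - j) := by
    rw [← List.length_drop]; exact (List.take_length).symm
  have hb3 := fold_one d (S.getD j 0) (S.getD (S.length - 1) 0)
    (pairwise_getD_mono S hpw j (S.length - 1) (by omega) (by omega)) h3
    ((S.drop j).take (S.length - j)) r2.1 r2.2.1 r2.2.2
    (fun y hy => mem_block_bounds S hpw j S.length le_rfl y hy) hm2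
  rw [← hr2eta, ← hdj] at hb3
  obtain ⟨hc3, _⟩ := hb3
  omega

-- the prefix [0,s) is partitionable into k blocks of range ≤ d (k capped at 3)
def Qinv (S : List Int) (d : Int) (k : Int) (s : Nat) : Prop :=
  (k = 0 ∧ s = 0) ∨
  (k = 1 ∧ 1 ≤ s ∧ gp S 0 s ≤ d) ∨
  (k = 2 ∧ ∃ i : Nat, 1 ≤ i ∧ i < s ∧ gp S 0 i ≤ d ∧ gp S i s ≤ d) ∨
  (3 ≤ k)

theorem Qinv_step (S : List Int) (d : Int) (k : Int) (s p : Nat)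
    (hq : Qinv S d k s) (hsp : s < p) (hg : gp S s p ≤ d) : Qinv S d (k + 1) p := by
  rcases hq with ⟨hk, hs⟩ | ⟨hk, hs1, hs2⟩ | ⟨hk, i, hi1, hi2, hi3, hi4⟩ | hk
  · exact Or.inr (Or.inl ⟨by omega, by omega, by rw [← hs]; exact hg⟩)
  · exact Or.inr (Or.inr (Or.inl ⟨by omega, s, hs1, hsp, hs2, hg⟩))
  · exact Or.inr (Or.inr (Or.inr (by omega)))
  · exact Or.inr (Or.inr (Or.inr (by omega)))

-- invariant of A's greedy loop: it cuts the sorted list into blocks of range ≤ d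
theorem fold_run (S : List Int) (hpw : S.Pairwise (· ≤ ·)) (d : Int) (hd : 0 ≤ d) :
    ∀ (Y : List Int) (p : Nat) (c : Int) (s : Nat) (mn mx : Int),
      Y = S.drop p → mn = S.getD s 0 → mx = S.getD (p - 1) 0 → s < p → p ≤ S.length →
      mx - mn ≤ d → Qinv S d (c - 1) s →
      ∃ s' : Nat, s' < S.length ∧ gp S s' S.length ≤ d ∧
        Qinv S d ((Y.foldl (greedyStep d) (c, mn, mx)).1 - 1) s' := by
  intro Y
  induction Y with
  | nil =>
    intro p c s mn mx hY hmn hmx hsp hpn hspan hq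
    have hp : p = S.length := by
      have := (List.drop_eq_nil_iff).mp hY.symm
      omega
    refine ⟨s, by omega, ?_, hq⟩
    unfold gp
    rw [← hp, ← hmn, ← hmx] at *
    exact hspan
  | cons y Y' ih =>
    intro p c s mn mx hY hmn hmx hsp hpn hspan hq
    have hplen : p < S.length := by
      by_contra h
      rw [List.drop_eq_nil_iff.mpr (by omega)] at hY
      simp at hY
    have hcons : S.drop p = S[p] :: S.drop (p + 1) := List.drop_eq_getElem_cons hplen
    rw [hcons] at hY
    obtain ⟨hy, hY'⟩ : y = S[p] ∧ Y' = S.drop (p + 1) := by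
      constructor <;> [exact (List.cons.injEq _ _ _ _ ▸ hY).1.symm ▸ rfl; exact (List.cons.injEq _ _ _ _ ▸ hY).2]
    have hyg : y = S.getD p 0 := by rw [hy, getD_eq_getElem_int S p hplen]
    have hmny : mn ≤ y := by
      rw [hmn, hyg]; exact pairwise_getD_mono S hpw s p (by omega) hplen
    have hmxy : mx ≤ y := by
      rw [hmx, hyg]; exact pairwise_getD_mono S hpw (p - 1) p (by omega) hplen
    simp only [List.foldl_cons]
    by_cases hb : max mx y - min mn y > d
    · have hstep : greedyStep d (c, mn, mx) y = (c + 1, y, y) := by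
        unfold greedyStep; dsimp only; rw [if_pos hb]
      rw [hstep]
      apply ih (p + 1) (c + 1) p y y hY' hyg (by simpa using hyg) (by omega) (by omega) (by omega)
      have : c + 1 - 1 = (c - 1) + 1 := by omega
      rw [this]
      refine Qinv_step S d (c - 1) s p hq hsp ?_
      unfold gp
      rw [← hmn, ← hmx]
      omega
    · have hstep : greedyStep d (c, mn, mx) y = (c, min mn y, max mx y) := by
        unfold greedyStep; dsimp only; rw [if_neg hb]
      rw [hstep]
      have h1 : min mn y = mn := by omega
      have h2 : max mx y = y := by omega
      rw [h1, h2]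
      exact ih (p + 1) c s mn y hY' hmn (by simpa using hyg) (by omega) (by omega) (by omega) hq

-- a feasible greedy check yields a 3-way cut with all block ranges ≤ d
theorem feasible_cuts (S : List Int) (hpw : S.Pairwise (· ≤ ·)) (hn : 3 ≤ S.length)
    (d : Int) (hd : 0 ≤ d) (hf : numberGroups S d ≤ 3) :
    ∃ i j : Nat, 1 ≤ i ∧ i < j ∧ j < S.length ∧
      gp S 0 i ≤ d ∧ gp S i j ≤ d ∧ gp S j S.length ≤ d := by
  obtain ⟨a, t, rfl⟩ : ∃ a t, S = a :: t := by
    cases S with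
    | nil => simp at hn
    | cons a t => exact ⟨a, t, rfl⟩
  set S := a :: t with hS
  set n := S.length with hn'
  have ha0 : a = S.getD 0 0 := rfl
  have hrun := fold_run S hpw d hd t 1 1 0 a a rfl ha0 ha0 (by omega) (by omega)
    (by omega) (Or.inl ⟨by omega, rfl⟩)
  have hng : numberGroups S d = (t.foldl (greedyStep d) (1, a, a)).1 := rfl
  obtain ⟨s', hs'n, hgs', hq⟩ := hrun
  rw [← hng] at hq
  have mono2 : ∀ u1 u2 : Nat, u1 ≤ u2 → u2 < n → gp S u2 n ≤ gp S u1 n := by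
    intro u1 u2 h hu
    unfold gp
    have := pairwise_getD_mono S hpw u1 u2 h hu
    omega
  have gp0 : ∀ u : Nat, u < n → gp S u (u + 1) = 0 := by
    intro u hu; unfold gp; simp
  rcases hq with ⟨hk, hs⟩ | ⟨hk, hs1, hs2⟩ | ⟨hk, i, hi1, hi2, hi3, hi4⟩ | hk
  · -- one group: whole span ≤ d
    subst hs
    refine ⟨1, 2, le_rfl, by omega, by omega, ?_, ?_, ?_⟩
    · have := gp0 0 (by omega); norm_num at this; omega
    · have := gp0 1 (by omega); norm_num at this; omega
    · exact le_trans (mono2 0 2 (by omega) (by omega)) hgs'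
  · -- two groups [0,s'), [s',n)
    rcases Nat.lt_or_ge s' 2 with hs2' | hs2'
    · have hs1' : s' = 1 := by omega
      subst hs1'
      refine ⟨1, 2, le_rfl, by omega, by omega, ?_, ?_, ?_⟩
      · have := gp0 0 (by omega); norm_num at this; omega
      · have := gp0 1 (by omega); norm_num at this; omega
      · exact le_trans (mono2 1 2 (by omega) (by omega)) hgs'
    · refine ⟨1, s', le_rfl, by omega, by omega, ?_, ?_, hgs'⟩
      · have := gp0 0 (by omega); norm_num at this; omega
      · refine le_trans ?_ hs2
        unfold gp
        have := pairwise_getD_mono S hpw 0 1 (by omega) (by omega)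
        omega
  · -- three groups
    exact ⟨i, s', hi1, hi2, by omega, hi3, hi4, hgs'⟩
  · -- four or more groups: contradiction
    omega

-- the binary search returns the least feasible value
theorem bsLoop_eq (S : List Int) (m : Int)
    (hchar : ∀ e : Int, 0 ≤ e → (numberGroups S e ≤ 3 ↔ m ≤ e)) :
    ∀ (lo hi : Int), 0 ≤ lo → lo ≤ m → m ≤ hi → bsLoop S lo hi = m := by
  intro lo hi
  induction hfuel : (hi - lo).toNat using Nat.strong_induction_on generalizing lo hi with
  | _ fuel ih =>
    intro hlo hlom hmhi
    rw [bsLoop]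
    by_cases h : lo < hi
    · rw [dif_pos h]
      have hmid : PySem.Int.floordiv (lo + hi) 2 = (lo + hi) / 2 :=
        PySem.Int.floordiv_eq_ediv_of_pos (by omega)
      set mid := PySem.Int.floordiv (lo + hi) 2 with hm
      have hb1 : lo ≤ mid := by omega
      have hb2 : mid < hi := by omega
      by_cases hg : numberGroups S mid > 3
      · rw [if_pos hg]
        have hlt : mid < m := by
          by_contra hc
          have := (hchar mid (by omega)).mpr (by omega)
          omega
        exact ih ((hi - (mid + 1)).toNat) (by omega) (mid + 1) hi rfl (by omega) (by omega) hmhi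
      · rw [if_neg hg]
        have hle : m ≤ mid := (hchar mid (by omega)).mp (not_lt.mp hg)
        exact ih ((mid - lo).toNat) (by omega) lo mid rfl hlo hlom hle
    · rw [dif_neg h]
      omega

-- B's generator body, in Nat-index form
def mgp (S : List Int) (i j : Nat) : Int :=
  max (max (gp S 0 i) (gp S i j)) (gp S j S.length)

theorem cutVal_eq_mgp (S : List Int) (i j : Int) (hi : 1 ≤ i) (hij : i < j)
    (hj : j < (S.length : Int)) :
    cutVal S (S.length : Int) i j = mgp S i.toNat j.toNat := by
  unfold cutVal mgp gp
  have hlen : 0 < S.length := by omega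
  rw [PySem.List.pyGetD_eq_getElem S (i := i - 1) 0 (by omega) (by omega),
      PySem.List.pyGetD_eq_getElem S (i := 0) 0 (by omega) (by omega),
      PySem.List.pyGetD_eq_getElem S (i := j - 1) 0 (by omega) (by omega),
      PySem.List.pyGetD_eq_getElem S (i := i) 0 (by omega) (by omega),
      PySem.List.pyGetD_eq_getElem S (i := (S.length : Int) - 1) 0 (by omega) (by omega),
      PySem.List.pyGetD_eq_getElem S (i := j) 0 (by omega) (by omega),
      getD_eq_getElem_int S (i.toNat - 1) (by omega),
      getD_eq_getElem_int S 0 (by omega),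
      getD_eq_getElem_int S (j.toNat - 1) (by omega),
      getD_eq_getElem_int S i.toNat (by omega),
      getD_eq_getElem_int S (S.length - 1) (by omega),
      getD_eq_getElem_int S j.toNat (by omega)]
  have e1 : (i - 1).toNat = i.toNat - 1 := by omega
  have e2 : (0 : Int).toNat = 0 := rfl
  have e3 : (j - 1).toNat = j.toNat - 1 := by omega
  have e4 : ((S.length : Int) - 1).toNat = S.length - 1 := by omega
  simp only [e1, e2, e3, e4]

-- B's candidate list
def cands (S : List Int) (n : Int) : List Int :=
  (PySem.List.pyRange 1 (n - 1) 1).flatMap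
    (fun i => (PySem.List.pyRange (i + 1) n 1).map (fun j => cutVal S n i j))

theorem mem_cands_iff (S : List Int) (n : Int) (x : Int) :
    x ∈ cands S n ↔ ∃ i j : Int, 1 ≤ i ∧ i < n - 1 ∧ i + 1 ≤ j ∧ j < n ∧ x = cutVal S n i j := by
  unfold cands
  simp only [List.mem_flatMap, List.mem_map, PySem.List.mem_pyRange_one]
  constructor
  · rintro ⟨i, ⟨h1, h2⟩, j, ⟨h3, h4⟩, rfl⟩
    exact ⟨i, j, h1, h2, h3, h4, rfl⟩
  · rintro ⟨i, j, h1, h2, h3, h4, rfl⟩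
    exact ⟨i, ⟨h1, h2⟩, j, ⟨h3, h4⟩, rfl⟩

-- B's result: an attained lower bound of all 3-way-cut values
theorem alt_min_spec (S : List Int) (hn : 3 ≤ S.length) :
    (∃ i j : Nat, 1 ≤ i ∧ i < j ∧ j < S.length ∧
      (PySem.List.min? (cands S (S.length : Int)) (fun y => y)).getD 0 = mgp S i j) ∧
    (∀ i j : Nat, 1 ≤ i → i < j → j < S.length →
      (PySem.List.min? (cands S (S.length : Int)) (fun y => y)).getD 0 ≤ mgp S i j) := by
  set n : Int := (S.length : Int) with hnn
  have hne : cands S n ≠ [] := by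
    intro h
    have : cutVal S n 1 2 ∈ cands S n := by
      rw [mem_cands_iff]
      exact ⟨1, 2, le_rfl, by omega, by omega, by omega, rfl⟩
    rw [h] at this
    simp at this
  obtain ⟨m0, hm0⟩ : ∃ m0, PySem.List.min? (cands S n) (fun y => y) = some m0 := by
    cases h : PySem.List.min? (cands S n) (fun y => y) with
    | none => exact absurd ((PySem.List.min?_eq_none_iff _ _).mp h) hne
    | some m0 => exact ⟨m0, rfl⟩
  have hmem := PySem.List.min?_mem hm0
  have hmin := PySem.List.min?_isMin hm0
  rw [hm0]
  simp only [Option.getD_some]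
  constructor
  · obtain ⟨i, j, h1, h2, h3, h4, hx⟩ := (mem_cands_iff S n m0).mp hmem
    refine ⟨i.toNat, j.toNat, by omega, by omega, by omega, ?_⟩
    rw [hx, cutVal_eq_mgp S i j h1 (by omega) (by omega)]
  · intro i j hi hij hj
    have hc : cutVal S n (i : Int) (j : Int) ∈ cands S n := by
      rw [mem_cands_iff]
      exact ⟨i, j, by exact_mod_cast hi, by omega, by omega, by rw [hnn]; exact_mod_cast hj, rfl⟩
    have := hmin _ hc
    rw [cutVal_eq_mgp S (i : Int) (j : Int) (by exact_mod_cast hi) (by exact_mod_cast hij)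
      (by exact_mod_cast hj)] at this
    simpa using this

theorem gp_nonneg (S : List Int) (hpw : S.Pairwise (· ≤ ·)) (u v : Nat)
    (huv : u ≤ v - 1) (hv : v - 1 < S.length) : 0 ≤ gp S u v := by
  unfold gp
  have := pairwise_getD_mono S hpw u (v - 1) huv hv
  omega

theorem gp_le_total (S : List Int) (hpw : S.Pairwise (· ≤ ·)) (u v : Nat)
    (hu : u < S.length) (hv : v ≤ S.length) : gp S u v ≤ gp S 0 S.length := by
  unfold gp
  have h1 := pairwise_getD_mono S hpw (v - 1) (S.length - 1) (by omega) (by omega)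
  have h2 := pairwise_getD_mono S hpw 0 u (by omega) hu
  omega

theorem main_equiv (A : List Int) (hA : A ≠ []) : solution A = solution_alt A := by
  have hpw : (PySem.List.sorted A (fun x => x) false).Pairwise (· ≤ ·) :=
    PySem.List.sorted_pairwise A (fun x => x)
  set S := PySem.List.sorted A (fun x => x) false with hSdef
  have hSne : S ≠ [] := by
    rw [hSdef, Ne, PySem.List.sorted_eq_nil_iff]
    exact hA
  have hlen : 0 < S.length := List.length_pos_iff.mpr hSne
  -- A's initial maxDiff is the total span
  have htot : PySem.List.pyGetD S (-1) 0 - PySem.List.pyGetD S 0 0 = gp S 0 S.length := by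
    unfold gp
    rw [PySem.List.pyGetD_neg_one S 0 hSne, PySem.List.pyGetD_zero,
        List.getLast_eq_getElem, ← getD_eq_getElem_int S (S.length - 1) (by omega)]
  have htot0 : 0 ≤ gp S 0 S.length := gp_nonneg S hpw 0 S.length (by omega) (by omega)
  have hsol : solution A = bsLoop S 0 (gp S 0 S.length) := by
    show bsLoop S 0 (PySem.List.pyGetD S (-1) 0 - PySem.List.pyGetD S 0 0) = _
    rw [htot]
  rcases Nat.lt_or_ge S.length 3 with hn | hn
  · -- fewer than 3 elements: both sides are 0
    have halt : solution_alt A = 0 := by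
      show (if ((S.length : Int)) < 3 then (0:Int) else _) = 0
      rw [if_pos (by exact_mod_cast hn)]
    rw [halt, hsol]
    apply bsLoop_eq S 0 _ 0 _ le_rfl le_rfl htot0
    intro e he
    obtain ⟨a, t, hat⟩ := List.exists_cons_of_ne_nil hSne
    have hc : numberGroups S e ≤ 3 := by
      rw [hat]
      show (t.foldl (greedyStep e) (1, a, a)).1 ≤ 3
      have := fold_count_le e t (1, a, a)
      have hlt : t.length ≤ 1 := by
        have : S.length = t.length + 1 := by rw [hat]; simp
        omega
      have h3 : ((1:Int), a, a).1 = 1 := rfl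
      rw [h3] at this
      omega
    constructor
    · intro _; exact he
    · intro _; exact hc
  · -- the real case: n ≥ 3
    set m := (PySem.List.min? (cands S (S.length : Int)) (fun y => y)).getD 0 with hm
    have halt : solution_alt A = m := by
      unfold solution_alt
      rw [← hSdef, if_neg (by exact_mod_cast Nat.not_lt.mpr hn)]
      rfl
    obtain ⟨⟨i0, j0, hi0, hij0, hj0, hatt⟩, hlb⟩ := alt_min_spec S hn
    rw [← hm] at hatt hlb
    rw [halt, hsol]
    have hm0 : 0 ≤ m := by
      rw [hatt]
      refine le_trans (gp_nonneg S hpw 0 i0 (by omega) (by omega)) ?_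
      unfold mgp
      exact le_trans (le_max_left _ _) (le_max_left _ _)
    have hmtot : m ≤ gp S 0 S.length := by
      rw [hatt]
      unfold mgp
      refine max_le (max_le ?_ ?_) ?_ <;> exact gp_le_total S hpw _ _ (by omega) (by omega)
    apply bsLoop_eq S m ?_ 0 (gp S 0 S.length) le_rfl hm0 hmtot
    intro e he
    constructor
    · intro hf
      obtain ⟨i, j, h1, h2, h3, g1, g2, g3⟩ := feasible_cuts S hpw hn e he hf
      refine le_trans (hlb i j h1 h2 h3) ?_
      unfold mgp
      exact max_le (max_le g1 g2) g3
    · intro hme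
      rw [hatt] at hme
      unfold mgp at hme
      exact cuts_feasible S hpw e i0 j0 hi0 hij0 hj0
        (le_trans (le_trans (le_max_left _ _) (le_max_left _ _)) hme)
        (le_trans (le_trans (le_max_right _ _) (le_max_left _ _)) hme)
        (le_trans (le_max_right _ _) hme)

-- ===== VERDICT (by name: the statement is the Claim_ definition above) =====
theorem solution_spec : Claim_equal_solution := by
  intro A _ hpre
  unfold Spec_solution
  exact main_equiv A hpre
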